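-- pv_equiv track=rewrite | github.com/DXN1-termux/BUGHUNTER-AI | skills.py | _extract_docstring
-- ===== SOURCE A (Python) =====
-- def _extract_docstring(src: str) -> str:
--     """Extract the module docstring (single- or multi-line)."""
--     lines = src.splitlines()
--     i = 0
--     while i < len(lines) and not lines[i].strip():
--         i += 1
--     if i >= len(lines):
--         return ""
--     s = lines[i].lstrip()
--     for q in ('"""', "'''"):
--         if s.startswith(q):
--             body = s[3:]
--             if q in body:
--                 return body.split(q, 1)[0].strip()
--             buf = [body]
--             for j in range(i + 1, len(lines)):
--                 if q in lines[j]: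
--                     buf.append(lines[j].split(q, 1)[0])
--                     return " ".join(x.strip() for x in buf if x.strip())
--                 buf.append(lines[j])
--             return " ".join(x.strip() for x in buf if x.strip())
--     return ""
-- ===== SOURCE B (Python) =====
-- def _extract_docstring(src: str) -> str:
--     """Extract the module docstring (single- or multi-line)."""
--     lines = src.splitlines()
--     while lines and not lines[0].strip():
--         lines = lines[1:]
--     if not lines:
--         return ""
--     s = lines[0].lstrip()
--     q = s[:3]
--     if q not in ('"""', "'''"):
--         return ""
--     rest = "\n".join([s[3:]] + lines[1:])
--     idx = rest.find(q)
--     content = rest[:idx] if idx != -1 else rest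
--     return " ".join(x.strip() for x in content.splitlines() if x.strip())
-- ===== Notes on version B (the rewrite author's own statement) =====
-- stated objective: simpler
-- what changed: B replaces A's two-branch logic (separate single-line early return plus an incremental append-and-check loop over the remaining lines) by one uniform pipeline: join the opener body and the remaining lines into a single string, locate the closing quote with one find, slice, and re-split/strip once; the single- and multi-line cases become the same code path.
import Mathlib
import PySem

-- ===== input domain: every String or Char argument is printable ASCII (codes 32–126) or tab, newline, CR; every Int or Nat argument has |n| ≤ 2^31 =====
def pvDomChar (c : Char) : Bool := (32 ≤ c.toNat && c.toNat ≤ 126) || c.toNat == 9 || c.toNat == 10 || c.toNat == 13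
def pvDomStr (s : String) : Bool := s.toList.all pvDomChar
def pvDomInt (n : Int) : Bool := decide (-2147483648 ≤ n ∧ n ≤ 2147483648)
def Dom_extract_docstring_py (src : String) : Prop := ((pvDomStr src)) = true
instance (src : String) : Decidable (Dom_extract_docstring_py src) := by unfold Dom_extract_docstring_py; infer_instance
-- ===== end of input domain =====

-- B unifies A's single-line early return and its incremental append-and-check loop into one
-- join / find / slice / re-split pipeline (objective: simpler; same asymptotic cost).

-- ===== PORT A =====
-- body.split(q, 1)[0]  (q is never empty here, so split returns a nonempty list; "" is a dead default)
def pvSplitHead (s q : String) : String :=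
  match PySem.Str.splitMax? s q 1 with
  | some (p :: _) => p
  | _ => ""

-- " ".join(x.strip() for x in buf if x.strip())
def pvCleanA (buf : List String) : String :=
  PySem.Str.join " " ((buf.filter (fun x => PySem.Str.strip x != "")).map PySem.Str.strip)

-- the inner 'for j in range(i+1, len(lines))' loop, carrying buf
def pvScanA (q : String) : List String → List String → String
  | [], buf => pvCleanA buf
  | l :: rs, buf =>
    if PySem.Str.isIn q l then pvCleanA (buf ++ [pvSplitHead l q])
    else pvScanA q rs (buf ++ [l])

-- the body of 'if s.startswith(q):'
def pvOpenA (q s : String) (rest : List String) : String :=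
  let body := PySem.Str.slice s (some 3) none
  if PySem.Str.isIn q body then PySem.Str.strip (pvSplitHead body q)
  else pvScanA q rest [body]

-- the leading-blank skip ('while i < len(lines) and not lines[i].strip()') fused with the
-- dispatch on lines[i]; the 'for q in (...)' loop is unrolled into its two iterations
def pvMainA : List String → String
  | [] => ""
  | l :: ls =>
    if PySem.Str.strip l = "" then pvMainA ls
    else
      let s := PySem.Str.lstrip l
      if PySem.Str.startswith s "\"\"\"" then pvOpenA "\"\"\"" s ls
      else if PySem.Str.startswith s "'''" then pvOpenA "'''" s ls
      else ""

def extract_docstring_py (src : String) : String := pvMainA (PySem.Str.splitlines src)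

-- ===== PORT B =====
-- while lines and not lines[0].strip(): lines = lines[1:]
def pvDropBlank : List String → List String
  | [] => []
  | l :: ls => if PySem.Str.strip l = "" then pvDropBlank ls else l :: ls

-- " ".join(x.strip() for x in content.splitlines() if x.strip())
def pvCleanB (content : String) : String :=
  PySem.Str.join " " (((PySem.Str.splitlines content).filter (fun x => PySem.Str.strip x != "")).map PySem.Str.strip)

def extract_docstring_py_alt (src : String) : String :=
  match pvDropBlank (PySem.Str.splitlines src) with
  | [] => ""
  | l :: tail =>
    let s := PySem.Str.lstrip l
    let q := PySem.Str.slice s none (some 3)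
    if q = "\"\"\"" ∨ q = "'''" then
      let rest := PySem.Str.join "\n" (PySem.Str.slice s (some 3) none :: tail)
      let idx := PySem.Str.find rest q
      if idx ≠ -1 then pvCleanB (PySem.Str.slice rest none (some idx)) else pvCleanB rest
    else ""

-- ===== PRECONDITION & SPEC =====
def Spec_extract_docstring_py (src : String) (out : String) : Prop := out = extract_docstring_py_alt src
instance (src : String) (out : String) : Decidable (Spec_extract_docstring_py src out) := by unfold Spec_extract_docstring_py; infer_instance

-- ===== CLAIM (what is proved, stated in full; the proofs are below) =====
def Claim_equal_extract_docstring_py : Prop := ∀ (src : String), Dom_extract_docstring_py src → Spec_extract_docstring_py src (extract_docstring_py src)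

-- ===== LEMMAS AND PROOFS =====

-- String.toList is injective (String is ByteArray-backed; go through ofList)
theorem pvStrInj {s t : String} (h : s.toList = t.toList) : s = t := by
  have h2 := congrArg String.ofList h
  simpa using h2

theorem pvMapToListInj {xs ys : List String} (h : xs.map String.toList = ys.map String.toList) : xs = ys := by
  induction xs generalizing ys with
  | nil => cases ys <;> simp_all
  | cons a as ih =>
    cases ys with
    | nil => simp_all
    | cons b bs =>
      simp only [List.map_cons, List.cons.injEq] at h
      exact congrArg₂ _ (pvStrInj h.1) (ih h.2)

-- the line-break predicate of Python's splitlines (definitionally the one inside PySem.Chars.splitlines)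
def pvIsB (c : Char) : Bool :=
  decide (c.toNat = 10) || decide (c.toNat = 13) || decide (c.toNat = 11) || decide (c.toNat = 12) ||
  decide (c.toNat = 28) || decide (c.toNat = 29) || decide (c.toNat = 30) || decide (c.toNat = 133) ||
  decide (c.toNat = 8232) || decide (c.toNat = 8233)

def pvBF (l : List Char) : Prop := ∀ c ∈ l, pvIsB c = false

-- splitlines.go with the accumulator abstracted away
def pvSL : List Char → List Char → List (List Char)
  | [], cur => if cur.isEmpty then [] else [cur.reverse]
  | '\x0d' :: '\n' :: rest, cur => cur.reverse :: pvSL rest []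
  | c :: rest, cur => if pvIsB c then cur.reverse :: pvSL rest [] else pvSL rest (c :: cur)

theorem pvSL_cons (c : Char) (rest cur : List Char)
    (h : ∀ r1, c = '\x0d' → rest = '\n' :: r1 → False) :
    pvSL (c :: rest) cur = if pvIsB c then cur.reverse :: pvSL rest [] else pvSL rest (c :: cur) := by
  rw [pvSL.eq_def]
  split
  · simp_all
  · rename_i heq; exfalso; injection heq with h1 h2; exact h _ h1 h2
  · rename_i heq; injection heq with h1 h2; subst h1; subst h2; rfl

theorem pvSL_nil (cur : List Char) : pvSL [] cur = if cur.isEmpty then [] else [cur.reverse] := rfl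

theorem pvSL_rn (rest cur : List Char) : pvSL ('\x0d' :: '\n' :: rest) cur = cur.reverse :: pvSL rest [] := rfl

theorem pvGo_eq (s cur : List Char) (acc : List (List Char)) :
    PySem.Chars.splitlines.go pvIsB s cur acc = acc.reverse ++ pvSL s cur := by
  induction s, cur, acc using PySem.Chars.splitlines.go.induct (isB := pvIsB) with
  | case1 cur acc h =>
    rw [PySem.Chars.splitlines.go.eq_def]; simp [pvSL, h]
  | case2 cur acc h =>
    rw [PySem.Chars.splitlines.go.eq_def]; simp [pvSL, h]
  | case3 rest cur acc ih =>
    rw [PySem.Chars.splitlines.go.eq_def]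
    simp only []
    rw [ih, pvSL_rn]
    simp
  | case4 c rest cur acc h hb ih =>
    have hstep : PySem.Chars.splitlines.go pvIsB (c :: rest) cur acc =
        PySem.Chars.splitlines.go pvIsB rest [] (cur.reverse :: acc) := by
      rw [PySem.Chars.splitlines.go.eq_def]
      split
      · rename_i heq; simp at heq
      · rename_i heq; exfalso; injection heq with h1 h2; exact h _ h1 h2
      · rename_i heq; injection heq with h1 h2; subst h1; subst h2; rw [if_pos hb]
    rw [hstep, ih, pvSL_cons c rest cur h, if_pos hb]
    simp
  | case5 c rest cur acc h hb ih =>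
    have hstep : PySem.Chars.splitlines.go pvIsB (c :: rest) cur acc =
        PySem.Chars.splitlines.go pvIsB rest (c :: cur) acc := by
      rw [PySem.Chars.splitlines.go.eq_def]
      split
      · rename_i heq; simp at heq
      · rename_i heq; exfalso; injection heq with h1 h2; exact h _ h1 h2
      · rename_i heq; injection heq with h1 h2; subst h1; subst h2; rw [if_neg hb]
    rw [hstep, ih, pvSL_cons c rest cur h, if_neg hb]

theorem pvSplitlines_eq (s : List Char) : PySem.Chars.splitlines s = pvSL s [] := by
  have h : PySem.Chars.splitlines s = PySem.Chars.splitlines.go pvIsB s [] [] := rfl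
  rw [h, pvGo_eq]; rfl

-- every line splitlines produces is free of line-break characters
theorem pvSL_bf : ∀ (s cur : List Char), pvBF cur → ∀ l ∈ pvSL s cur, pvBF l := by
  intro s cur
  induction s, cur using pvSL.induct with
  | case1 cur hemp =>
    intro _ l hl
    rw [pvSL_nil, if_pos hemp] at hl
    simp at hl
  | case2 cur hemp =>
    intro hb l hl
    rw [pvSL_nil, if_neg hemp] at hl
    simp only [List.mem_singleton] at hl
    subst hl
    intro c hc
    exact hb c (List.mem_reverse.mp hc)
  | case3 rest cur ih =>
    intro hb l hl
    rw [pvSL_rn] at hl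
    rcases List.mem_cons.mp hl with hl | hl
    · subst hl
      intro c hc
      exact hb c (List.mem_reverse.mp hc)
    · exact ih (by intro c hc; simp at hc) l hl
  | case4 c rest cur hg hbk ih =>
    intro hb l hl
    rw [pvSL_cons c rest cur hg, if_pos hbk] at hl
    rcases List.mem_cons.mp hl with hl | hl
    · subst hl
      intro c2 hc2
      exact hb c2 (List.mem_reverse.mp hc2)
    · exact ih (by intro c2 hc2; simp at hc2) l hl
  | case5 c rest cur hg hbk ih =>
    intro hb l hl
    rw [pvSL_cons c rest cur hg, if_neg hbk] at hl
    refine ih ?_ l hl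
    intro c2 hc2
    rcases List.mem_cons.mp hc2 with hc2 | hc2
    · subst hc2; simpa using hbk
    · exact hb c2 hc2

theorem pvLines_bf (s : String) : ∀ l ∈ PySem.Str.splitlines s, pvBF l.toList := by
  intro l hl
  have h1 : l.toList ∈ (PySem.Str.splitlines s).map String.toList := List.mem_map_of_mem hl
  rw [PySem.Str.splitlines_map_toList, pvSplitlines_eq] at h1
  exact pvSL_bf s.toList [] (by intro c hc; simp at hc) _ h1

theorem pvBF_of_subset {l m : List Char} (h : pvBF l) (hs : ∀ c ∈ m, c ∈ l) : pvBF m :=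
  fun c hc => h c (hs c hc)

-- consuming a break-free prefix
theorem pvSL_append {cs : List Char} (h : pvBF cs) : ∀ (r cur : List Char),
    pvSL (cs ++ r) cur = pvSL r (cs.reverse ++ cur) := by
  induction cs with
  | nil => intro r cur; simp
  | cons c cs ih =>
    intro r cur
    have hc : pvIsB c = false := h c (by simp)
    have hcr : c ≠ '\x0d' := by
      intro hcd; subst hcd; simp [pvIsB] at hc
    rw [List.cons_append, pvSL_cons c (cs ++ r) cur (fun r1 h1 _ => hcr h1), if_neg (by simp [hc])]
    rw [ih (fun x hx => h x (by simp [hx])) r (c :: cur)]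
    simp

def pvDTE (parts : List (List Char)) : List (List Char) :=
  if parts.getLast? = some [] then parts.dropLast else parts

def pvDTES (parts : List String) : List String :=
  if parts.getLast? = some "" then parts.dropLast else parts

theorem pvGetLastQ_map {α β : Type} (f : α → β) (l : List α) :
    (l.map f).getLast? = (l.getLast?).map f := by
  induction l with
  | nil => rfl
  | cons a as ih =>
    cases as with
    | nil => rfl
    | cons b bs => simpa using ih

theorem pvDropLast_map {α β : Type} (f : α → β) (l : List α) :
    (l.map f).dropLast = l.dropLast.map f := by
  induction l with
  | nil => rfl
  | cons a as ih =>
    cases as with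
    | nil => rfl
    | cons b bs => simpa using ih

theorem pvDTE_map (parts : List String) :
    pvDTE (parts.map String.toList) = (pvDTES parts).map String.toList := by
  unfold pvDTE pvDTES
  rw [pvGetLastQ_map]
  rcases h : parts.getLast? with _ | x
  · simp
  · by_cases hx : x = ""
    · subst hx
      rw [if_pos (by rfl), if_pos rfl, pvDropLast_map]
    · rw [if_neg (by
        intro hc
        simp only [Option.map_some, Option.some.injEq] at hc
        exact hx (pvStrInj (by simpa using hc))), if_neg (by simpa using hx)]

theorem pvSL_join : ∀ (ps : List (List Char)) (p : List Char), pvBF p → (∀ l ∈ ps, pvBF l) →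
    pvSL (PySem.Chars.join ['\n'] (p :: ps)) [] = pvDTE (p :: ps) := by
  intro ps
  induction ps with
  | nil =>
    intro p hp _
    rw [PySem.Chars.join_singleton]
    have h0 := pvSL_append hp [] []
    simp only [List.append_nil] at h0
    rw [h0]
    rcases p with _ | ⟨c, cs⟩
    · simp [pvSL, pvDTE]
    · simp [pvSL, pvDTE]
  | cons p2 ps2 ih =>
    intro p hp hps
    rw [PySem.Chars.join_cons_cons]
    have h1 : p ++ ['\n'] ++ PySem.Chars.join ['\n'] (p2 :: ps2) =
        p ++ ('\n' :: PySem.Chars.join ['\n'] (p2 :: ps2)) := by simp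
    rw [h1, pvSL_append hp]
    have h2 : pvSL ('\n' :: PySem.Chars.join ['\n'] (p2 :: ps2)) (p.reverse ++ []) =
        (p.reverse ++ []).reverse :: pvSL (PySem.Chars.join ['\n'] (p2 :: ps2)) [] := by
      rw [pvSL_cons '\n' _ _ (fun r1 hr1 _ => by exact absurd hr1 (by decide))]
      rw [if_pos (by decide)]
    rw [h2, ih p2 (hps p2 (by simp)) (fun l hl => hps l (by simp [hl]))]
    simp only [List.append_nil, List.reverse_reverse]
    show p :: pvDTE (p2 :: ps2) = pvDTE (p :: p2 :: ps2)
    unfold pvDTE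
    simp only [List.getLast?_cons_cons, List.dropLast_cons₂]
    split <;> rfl

-- ---- find / infix facts ----

theorem pvFind_eq_of {s q : List Char} (n : ℕ) (h1 : q <+: s.drop n)
    (h2 : ∀ i < n, ¬ q <+: s.drop i) : PySem.Chars.find s q = (n : ℤ) := by
  have hin : PySem.Chars.isIn q s = true := (PySem.Chars.exists_prefix_drop_iff_isIn q s).mp ⟨n, h1⟩
  have hnn : 0 ≤ PySem.Chars.find s q :=
    (PySem.Chars.find_nonneg_iff s q).mpr ((PySem.Chars.isIn_iff_infix q s).mp hin)
  obtain ⟨hp, hmin⟩ := PySem.Chars.find_spec hnn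
  have heq : (PySem.Chars.find s q).toNat = n := by
    rcases lt_trichotomy (PySem.Chars.find s q).toNat n with h | h | h
    · exact absurd hp (h2 _ h)
    · exact h
    · exact absurd h1 (hmin n h)
  omega

theorem pvPrefix_cut {q a t : List Char} (hnl : '\n' ∉ q) (h : q <+: a ++ '\n' :: t) : q <+: a := by
  by_cases hlen : q.length ≤ a.length
  · have h3 := List.prefix_iff_eq_take.mp h
    rw [List.take_append_of_le_length hlen] at h3
    exact List.prefix_iff_eq_take.mpr h3
  · exfalso
    push_neg at hlen
    have hlen2 : a.length < (a ++ '\n' :: t).length := by simp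
    have hget : q[a.length]'hlen = (a ++ '\n' :: t)[a.length]'hlen2 := h.getElem hlen
    have h4 : (a ++ '\n' :: t)[a.length]'hlen2 = '\n' := by
      rw [List.getElem_append_right (Nat.le_refl a.length)]
      simp
    have hmem : '\n' ∈ q := by
      rw [← h4, ← hget]; exact List.getElem_mem hlen
    exact hnl hmem

theorem pvInfix_iff_exists_drop {q s : List Char} : q <:+: s ↔ ∃ i, q <+: s.drop i := by
  constructor
  · intro h
    exact (PySem.Chars.exists_prefix_drop_iff_isIn q s).mpr ((PySem.Chars.isIn_iff_infix q s).mpr h)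
  · intro h
    obtain ⟨i, hi⟩ := h
    exact (PySem.Chars.isIn_iff_infix q s).mp
      ((PySem.Chars.exists_prefix_drop_iff_isIn q s).mp ⟨i, hi⟩)

theorem pvInfix_split {q a t : List Char} (hnl : '\n' ∉ q) :
    q <:+: (a ++ '\n' :: t) ↔ q <:+: a ∨ q <:+: t := by
  constructor
  · intro h
    obtain ⟨i, hi⟩ := pvInfix_iff_exists_drop.mp h
    by_cases hia : i ≤ a.length
    · left
      rw [List.drop_append, Nat.sub_eq_zero_of_le hia, List.drop_zero] at hi
      have := pvPrefix_cut hnl hi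
      exact pvInfix_iff_exists_drop.mpr ⟨i, this⟩
    · right
      push_neg at hia
      rw [List.drop_append] at hi
      rw [List.drop_eq_nil_of_le (by omega), List.nil_append] at hi
      have h5 : List.drop (i - a.length) ('\n' :: t) = List.drop (i - a.length - 1) t := by
        rcases Nat.exists_eq_add_of_lt hia with ⟨k, hk⟩
        subst hk
        have h6 : a.length + k + 1 - a.length = k + 1 := by omega
        have h7 : a.length + k + 1 - a.length - 1 = k := by omega
        rw [h7, h6, List.drop_succ_cons]
      rw [h5] at hi
      exact pvInfix_iff_exists_drop.mpr ⟨_, hi⟩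
  · intro h
    rcases h with h | h
    · obtain ⟨u, v, huv⟩ := h
      exact ⟨u, v ++ '\n' :: t, by rw [← huv]; simp⟩
    · obtain ⟨u, v, huv⟩ := h
      exact ⟨a ++ '\n' :: u, v, by rw [← huv]; simp⟩

theorem pvFind_append_left {q a t : List Char} (hnl : '\n' ∉ q)
    (ha : PySem.Chars.isIn q a = true) :
    PySem.Chars.find (a ++ '\n' :: t) q = PySem.Chars.find a q := by
  have hinf := (PySem.Chars.isIn_iff_infix q a).mp ha
  have hnn : 0 ≤ PySem.Chars.find a q := (PySem.Chars.find_nonneg_iff a q).mpr hinf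
  obtain ⟨hp, hmin⟩ := PySem.Chars.find_spec hnn
  have hk : (PySem.Chars.find a q).toNat ≤ a.length := by
    have := PySem.Chars.find_le_length a q
    omega
  have h1 : q <+: (a ++ '\n' :: t).drop (PySem.Chars.find a q).toNat := by
    rw [List.drop_append, Nat.sub_eq_zero_of_le hk, List.drop_zero]
    exact hp.trans (List.prefix_append _ _)
  have h2 : ∀ i < (PySem.Chars.find a q).toNat, ¬ q <+: (a ++ '\n' :: t).drop i := by
    intro i hi hq
    rw [List.drop_append, Nat.sub_eq_zero_of_le (by omega), List.drop_zero] at hq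
    exact hmin i hi (pvPrefix_cut hnl hq)
  rw [pvFind_eq_of _ h1 h2]
  omega

theorem pvFind_append_right {q a t : List Char} (hnl : '\n' ∉ q)
    (hna : PySem.Chars.isIn q a = false) (ht : PySem.Chars.isIn q t = true) :
    PySem.Chars.find (a ++ '\n' :: t) q = (a.length : ℤ) + 1 + PySem.Chars.find t q := by
  have hinf := (PySem.Chars.isIn_iff_infix q t).mp ht
  have hnn : 0 ≤ PySem.Chars.find t q := (PySem.Chars.find_nonneg_iff t q).mpr hinf
  obtain ⟨hp, hmin⟩ := PySem.Chars.find_spec hnn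
  have h1 : q <+: (a ++ '\n' :: t).drop (a.length + 1 + (PySem.Chars.find t q).toNat) := by
    rw [List.drop_append, List.drop_eq_nil_of_le (by omega), List.nil_append]
    have h4 : a.length + 1 + (PySem.Chars.find t q).toNat - a.length =
        (PySem.Chars.find t q).toNat + 1 := by omega
    rw [h4, List.drop_succ_cons]
    exact hp
  have h2 : ∀ i < a.length + 1 + (PySem.Chars.find t q).toNat,
      ¬ q <+: (a ++ '\n' :: t).drop i := by
    intro i hi hq
    by_cases hia : i ≤ a.length
    · rw [List.drop_append, Nat.sub_eq_zero_of_le hia, List.drop_zero] at hq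
      have hpre := pvPrefix_cut hnl hq
      have hin2 : PySem.Chars.isIn q a = true :=
        (PySem.Chars.isIn_iff_infix q a).mpr (pvInfix_iff_exists_drop.mpr ⟨i, hpre⟩)
      rw [hin2] at hna
      exact absurd hna (by simp)
    · push_neg at hia
      rw [List.drop_append, List.drop_eq_nil_of_le (by omega), List.nil_append] at hq
      rcases Nat.exists_eq_add_of_lt hia with ⟨j, hj⟩
      subst hj
      have h4 : a.length + j + 1 - a.length = j + 1 := by omega
      rw [h4, List.drop_succ_cons] at hq
      exact hmin j (by omega) hq
  rw [pvFind_eq_of _ h1 h2]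
  push_cast
  omega

theorem pvFind_cons {q : List Char} (c : Char) (rest : List Char) (hnp : ¬ q <+: c :: rest) :
    PySem.Chars.isIn q (c :: rest) = PySem.Chars.isIn q rest ∧
    (PySem.Chars.isIn q rest = true →
      PySem.Chars.find (c :: rest) q = 1 + PySem.Chars.find rest q) := by
  have hiff : q <:+: (c :: rest) ↔ q <:+: rest := by
    rw [List.infix_cons_iff]
    constructor
    · rintro (h | h)
      · exact absurd h hnp
      · exact h
    · intro h; right; exact h
  constructor
  · by_cases h : q <:+: rest
    · rw [(PySem.Chars.isIn_iff_infix _ _).mpr (hiff.mpr h), (PySem.Chars.isIn_iff_infix _ _).mpr h]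
    · rw [(PySem.Chars.isIn_eq_false_iff _ _).mpr (fun hc => h (hiff.mp hc)),
        (PySem.Chars.isIn_eq_false_iff _ _).mpr h]
  · intro hin
    have hinf := (PySem.Chars.isIn_iff_infix q rest).mp hin
    have hnn : 0 ≤ PySem.Chars.find rest q := (PySem.Chars.find_nonneg_iff rest q).mpr hinf
    obtain ⟨hp, hmin⟩ := PySem.Chars.find_spec hnn
    have h1 : q <+: (c :: rest).drop (1 + (PySem.Chars.find rest q).toNat) := by
      have h4 : 1 + (PySem.Chars.find rest q).toNat = (PySem.Chars.find rest q).toNat + 1 := by omega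
      rw [h4, List.drop_succ_cons]
      exact hp
    have h2 : ∀ i < 1 + (PySem.Chars.find rest q).toNat, ¬ q <+: (c :: rest).drop i := by
      intro i hi hq
      rcases i with _ | j
      · exact hnp (by simpa using hq)
      · rw [List.drop_succ_cons] at hq
        exact hmin j (by omega) hq
    rw [pvFind_eq_of _ h1 h2]
    push_cast
    omega

-- ---- split(q, 1)[0] ----

theorem pvGoSplit0 (q : List Char) : ∀ (fuel : ℕ) (l cur : List Char) (acc : List (List Char)),
    PySem.Chars.splitOnMax.go q fuel 0 l cur acc = ((cur.reverse ++ l) :: acc).reverse := by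
  intro fuel l cur acc
  rcases fuel with _ | f
  · rfl
  · rcases l with _ | ⟨c, rest⟩
    · show (cur.reverse :: acc).reverse = ((cur.reverse ++ []) :: acc).reverse
      simp
    · rfl

theorem pvGoSplit1 (q : List Char) (hq : q ≠ []) : ∀ (fuel : ℕ) (s cur : List Char),
    s.length < fuel → ∃ tl, PySem.Chars.splitOnMax.go q fuel 1 s cur [] =
      (cur.reverse ++ (if PySem.Chars.isIn q s = true then s.take (PySem.Chars.find s q).toNat else s)) :: tl := by
  intro fuel
  induction fuel with
  | zero => intro s cur h; omega
  | succ f ih =>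
    intro s cur hlen
    rcases s with _ | ⟨c, rest⟩
    · refine ⟨[], ?_⟩
      have hnin : PySem.Chars.isIn q [] = false :=
        (PySem.Chars.isIn_eq_false_iff _ _).mpr (by
          intro h
          exact hq (List.eq_nil_of_infix_nil h))
      rw [hnin]
      show (cur.reverse :: ([] : List (List Char))).reverse = _
      simp
    · rw [PySem.Chars.splitOnMax.go.eq_def]
      simp only [Nat.succ_ne_zero]
      rw [if_neg not_false]
      by_cases hpre : q.isPrefixOf (c :: rest) = true
      · rw [if_pos hpre]
        have hsub : (1:ℕ) - 1 = 0 := rfl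
        rw [hsub, pvGoSplit0]
        have hpfx : q <+: c :: rest := List.isPrefixOf_iff_prefix.mp hpre
        have hfind : PySem.Chars.find (c :: rest) q = (0 : ℤ) :=
          pvFind_eq_of 0 (by simpa using hpfx) (by omega)
        have hin : PySem.Chars.isIn q (c :: rest) = true :=
          (PySem.Chars.exists_prefix_drop_iff_isIn q (c :: rest)).mp ⟨0, by simpa using hpfx⟩
        refine ⟨[List.drop q.length (c :: rest)], ?_⟩
        rw [hin, hfind]
        simp
      · rw [if_neg hpre]
        obtain ⟨tl, htl⟩ := ih rest (c :: cur) (by simp at hlen ⊢; omega)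
        refine ⟨tl, ?_⟩
        rw [htl]
        have hnp : ¬ q <+: c :: rest := fun h => hpre (List.isPrefixOf_iff_prefix.mpr h)
        obtain ⟨hiseq, hfeq⟩ := pvFind_cons c rest hnp
        have hX : c :: (if PySem.Chars.isIn q rest = true then
              rest.take (PySem.Chars.find rest q).toNat else rest) =
            (if PySem.Chars.isIn q (c :: rest) = true then
              (c :: rest).take (PySem.Chars.find (c :: rest) q).toNat else c :: rest) := by
          by_cases hin : PySem.Chars.isIn q rest = true
          · have hin2 : PySem.Chars.isIn q (c :: rest) = true := by rw [hiseq]; exact hin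
            rw [if_pos hin, if_pos hin2, hfeq hin]
            have hnn : 0 ≤ PySem.Chars.find rest q :=
              (PySem.Chars.find_nonneg_iff rest q).mpr ((PySem.Chars.isIn_iff_infix q rest).mp hin)
            have h4 : ((1 : ℤ) + PySem.Chars.find rest q).toNat =
                (PySem.Chars.find rest q).toNat + 1 := by omega
            rw [h4, List.take_succ_cons]
          · have hin2 : ¬ PySem.Chars.isIn q (c :: rest) = true := by rw [hiseq]; exact hin
            rw [if_neg hin, if_neg hin2]
        congr 1
        rw [← hX]
        simp

theorem pvSplitOnMax_head (s q : List Char) (hq : q ≠ []) :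
    ∃ tl, PySem.Chars.splitOnMax s q 1 =
      (if PySem.Chars.isIn q s = true then s.take (PySem.Chars.find s q).toNat else s) :: tl := by
  unfold PySem.Chars.splitOnMax
  rw [if_neg (by norm_num)]
  obtain ⟨tl, htl⟩ := pvGoSplit1 q hq (s.length + 1) s [] (by omega)
  refine ⟨tl, ?_⟩
  have h1 : ((1 : ℤ)).toNat = 1 := rfl
  rw [h1, htl]
  simp

theorem pvSplitHead_eq (l q : String) (hq : q.toList ≠ []) (hin : PySem.Str.isIn q l = true) :
    pvSplitHead l q = PySem.Str.slice l none (some (PySem.Str.find l q)) := by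
  have hinC : PySem.Chars.isIn q.toList l.toList = true := by
    rw [← PySem.Str.isIn_eq]; exact hin
  have hnn : 0 ≤ PySem.Chars.find l.toList q.toList :=
    (PySem.Chars.find_nonneg_iff _ _).mpr ((PySem.Chars.isIn_iff_infix _ _).mp hinC)
  obtain ⟨tl, htl⟩ := pvSplitOnMax_head l.toList q.toList hq
  unfold pvSplitHead
  have hsm : PySem.Str.splitMax? l q 1 =
      some ((PySem.Chars.splitOnMax l.toList q.toList 1).map String.ofList) := by
    unfold PySem.Str.splitMax? PySem.Chars.splitMax?
    rw [if_neg (by simpa using hq)]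
    rfl
  rw [hsm, htl]
  simp only [List.map_cons, hinC, if_pos]
  apply pvStrInj
  have h2 : (PySem.Str.slice l none (some (PySem.Str.find l q))).toList =
      l.toList.take (PySem.Chars.find l.toList q.toList).toNat := by
    rw [PySem.Str.toList_slice, PySem.Chars.slice_eq_listSlice, PySem.Str.find_eq,
      PySem.List.slice_to _ hnn]
  rw [h2]
  simp

-- ---- the common normal form: clean (cut parts) ----

def pvCutC (q : List Char) : List (List Char) → List (List Char)
  | [] => []
  | p :: ps =>
    if PySem.Chars.isIn q p then [p.take (PySem.Chars.find p q).toNat] else p :: pvCutC q ps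

def pvCutS (q : String) : List String → List String
  | [] => []
  | p :: ps =>
    if PySem.Str.isIn q p then [PySem.Str.slice p none (some (PySem.Str.find p q))]
    else p :: pvCutS q ps

theorem pvCutS_map (q : String) : ∀ parts : List String,
    (pvCutS q parts).map String.toList = pvCutC q.toList (parts.map String.toList) := by
  intro parts
  induction parts with
  | nil => rfl
  | cons p ps ih =>
    simp only [pvCutS, pvCutC, List.map_cons]
    by_cases hin : PySem.Str.isIn q p = true
    · have hinC : PySem.Chars.isIn q.toList p.toList = true := by
        rw [← PySem.Str.isIn_eq]; exact hin
      have hnn : 0 ≤ PySem.Chars.find p.toList q.toList :=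
        (PySem.Chars.find_nonneg_iff _ _).mpr ((PySem.Chars.isIn_iff_infix _ _).mp hinC)
      rw [if_pos hin, if_pos hinC]
      simp only [List.map_cons, List.map_nil, List.cons.injEq, and_true]
      rw [PySem.Str.toList_slice, PySem.Chars.slice_eq_listSlice, PySem.Str.find_eq,
        PySem.List.slice_to _ hnn]
    · have hinC : ¬ PySem.Chars.isIn q.toList p.toList = true := by
        intro hc; apply hin; rw [PySem.Str.isIn_eq]; exact hc
      rw [if_neg hin, if_neg hinC]
      simp [ih]

theorem pvCutC_cons (q p : List Char) (ps : List (List Char)) :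
    pvCutC q (p :: ps) =
      if PySem.Chars.isIn q p then [p.take (PySem.Chars.find p q).toNat] else p :: pvCutC q ps := rfl

theorem pvCutC_ne_nil (q : List Char) (p : List Char) (ps : List (List Char)) :
    pvCutC q (p :: ps) ≠ [] := by
  simp only [pvCutC]
  split <;> simp

theorem pvCutC_bf (q : List Char) : ∀ parts : List (List Char), (∀ l ∈ parts, pvBF l) →
    ∀ l ∈ pvCutC q parts, pvBF l := by
  intro parts
  induction parts with
  | nil => intro _ l hl; simp [pvCutC] at hl
  | cons p ps ih =>
    intro h l hl
    simp only [pvCutC] at hl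
    split at hl
    · simp only [List.mem_singleton] at hl
      subst hl
      exact pvBF_of_subset (h p (by simp)) (fun c hc => List.take_subset _ _ hc)
    · rcases List.mem_cons.mp hl with hl | hl
      · exact hl ▸ h p (by simp)
      · exact ih (fun x hx => h x (by simp [hx])) l hl

-- ---- A-side reduction ----

theorem pvCleanB_eq (c : String) : pvCleanB c = pvCleanA (PySem.Str.splitlines c) := rfl

theorem pvScan_eq (q : String) (hq : q.toList ≠ []) : ∀ (rest buf : List String),
    pvScanA q rest buf = pvCleanA (buf ++ pvCutS q rest) := by
  intro rest
  induction rest with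
  | nil => intro buf; simp [pvScanA, pvCutS]
  | cons l rs ih =>
    intro buf
    simp only [pvScanA, pvCutS]
    by_cases hin : PySem.Str.isIn q l = true
    · rw [if_pos hin, if_pos hin, pvSplitHead_eq l q hq hin]
    · rw [if_neg hin, if_neg hin, ih]
      simp

-- ---- clean lemmas ----

theorem pvJoin_toList (sep : String) (parts : List String) :
    (PySem.Str.join sep parts).toList = PySem.Chars.join sep.toList (parts.map String.toList) :=
  PySem.Str.toList_join sep parts

theorem pvCleanA_single (x : String) : pvCleanA [x] = PySem.Str.strip x := by
  unfold pvCleanA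
  by_cases h : PySem.Str.strip x = ""
  · rw [List.filter_cons_of_neg (by simp [h])]
    rw [h]
    apply pvStrInj
    rw [pvJoin_toList]
    simp [PySem.Chars.join_nil]
  · rw [List.filter_cons_of_pos (by simp [h])]
    apply pvStrInj
    rw [pvJoin_toList]
    simp [PySem.Chars.join_singleton]

theorem pvCleanA_append_empty (l : List String) : pvCleanA (l ++ [""]) = pvCleanA l := by
  unfold pvCleanA
  rw [List.filter_append]
  have h : List.filter (fun x => PySem.Str.strip x != "") [""] = [] := by
    have hst : PySem.Str.strip "" = "" := rfl
    simp [hst]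
  rw [h, List.append_nil]

theorem pvCleanA_dtes (parts : List String) : pvCleanA (pvDTES parts) = pvCleanA parts := by
  unfold pvDTES
  split
  · rename_i h
    obtain ⟨ys, rfl⟩ : ∃ ys, parts = ys ++ [""] := by
      rcases List.getLast?_eq_some_iff.mp h with ⟨ys, hys⟩
      exact ⟨ys, hys⟩
    rw [pvCleanA_append_empty]
    congr 1
    simp
  · rfl

-- splitlines of a '\n'-join of break-free parts: the parts, minus one trailing empty piece
theorem pvSLJS (parts : List String) (hne : parts ≠ []) (hbf : ∀ l ∈ parts, pvBF l.toList) :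
    PySem.Str.splitlines (PySem.Str.join "\n" parts) = pvDTES parts := by
  apply pvMapToListInj
  rw [PySem.Str.splitlines_map_toList, pvJoin_toList, pvSplitlines_eq]
  rcases parts with _ | ⟨p, ps⟩
  · exact absurd rfl hne
  · have h1 : ("\n" : String).toList = ['\n'] := rfl
    rw [h1, List.map_cons, pvSL_join (ps.map String.toList) p.toList (hbf p (by simp))
      (by intro l hl; simp at hl; obtain ⟨x, hx, hxl⟩ := hl; exact hxl ▸ hbf x (by simp [hx]))]
    have h2 : p.toList :: ps.map String.toList = (p :: ps).map String.toList := rfl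
    rw [h2, pvDTE_map]

-- ---- B-side content reduction ----

theorem pvContentC (q : List Char) (hqnl : '\n' ∉ q) :
    ∀ (ps : List (List Char)) (p : List Char), pvBF p → (∀ l ∈ ps, pvBF l) →
    (if PySem.Chars.find (PySem.Chars.join ['\n'] (p :: ps)) q = -1 then
        PySem.Chars.join ['\n'] (p :: ps)
      else (PySem.Chars.join ['\n'] (p :: ps)).take
        (PySem.Chars.find (PySem.Chars.join ['\n'] (p :: ps)) q).toNat) =
      PySem.Chars.join ['\n'] (pvCutC q (p :: ps)) := by
  intro ps
  induction ps with
  | nil =>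
    intro p hp _
    rw [PySem.Chars.join_singleton]
    by_cases hin : PySem.Chars.isIn q p = true
    · have hnn : 0 ≤ PySem.Chars.find p q :=
        (PySem.Chars.find_nonneg_iff p q).mpr ((PySem.Chars.isIn_iff_infix q p).mp hin)
      rw [if_neg (by omega)]
      simp only [pvCutC]
      rw [if_pos hin, PySem.Chars.join_singleton]
    · have hf : PySem.Chars.find p q = -1 :=
        (PySem.Chars.find_eq_neg_one_iff p q).mpr
          (fun hc => hin ((PySem.Chars.isIn_iff_infix q p).mpr hc))
      rw [if_pos hf]
      simp only [pvCutC]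
      rw [if_neg hin, PySem.Chars.join_singleton]
  | cons p2 ps2 ih =>
    intro p hp hps
    have hbf2 : ∀ l ∈ ps2, pvBF l := fun l hl => hps l (by simp [hl])
    have hbp2 : pvBF p2 := hps p2 (by simp)
    have hJ : PySem.Chars.join ['\n'] (p :: p2 :: ps2) =
        p ++ '\n' :: PySem.Chars.join ['\n'] (p2 :: ps2) := by
      rw [PySem.Chars.join_cons_cons]; simp
    have iht := ih p2 hbp2 hbf2
    obtain ⟨c, cs, hcc⟩ : ∃ c cs, pvCutC q (p2 :: ps2) = c :: cs := by
      rcases hc : pvCutC q (p2 :: ps2) with _ | ⟨c, cs⟩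
      · exact absurd hc (pvCutC_ne_nil q p2 ps2)
      · exact ⟨c, cs, rfl⟩
    have hcut : PySem.Chars.join ['\n'] (pvCutC q (p :: p2 :: ps2)) =
        if PySem.Chars.isIn q p = true then p.take (PySem.Chars.find p q).toNat
        else p ++ '\n' :: PySem.Chars.join ['\n'] (pvCutC q (p2 :: ps2)) := by
      by_cases hin : PySem.Chars.isIn q p = true
      · rw [if_pos hin, pvCutC_cons, if_pos hin, PySem.Chars.join_singleton]
      · rw [if_neg hin, pvCutC_cons, if_neg hin, hcc, PySem.Chars.join_cons_cons, ← hcc]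
        simp
    rw [hJ, hcut]
    by_cases hin : PySem.Chars.isIn q p = true
    · have hnn : 0 ≤ PySem.Chars.find p q :=
        (PySem.Chars.find_nonneg_iff p q).mpr ((PySem.Chars.isIn_iff_infix q p).mp hin)
      rw [pvFind_append_left hqnl hin, if_neg (by omega), if_pos hin]
      have hk : (PySem.Chars.find p q).toNat ≤ p.length := by
        have := PySem.Chars.find_le_length p q
        omega
      rw [List.take_append_of_le_length hk]
    · have hinF : PySem.Chars.isIn q p = false := by simpa using hin
      rw [if_neg hin]
      by_cases hint : PySem.Chars.isIn q (PySem.Chars.join ['\n'] (p2 :: ps2)) = true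
      · have hnv : 0 ≤ PySem.Chars.find (PySem.Chars.join ['\n'] (p2 :: ps2)) q :=
          (PySem.Chars.find_nonneg_iff _ q).mpr ((PySem.Chars.isIn_iff_infix q _).mp hint)
        rw [pvFind_append_right hqnl hinF hint, if_neg (by omega)]
        rw [if_neg (by omega)] at iht
        rw [← iht]
        have h4 : ((p.length : ℤ) + 1 + PySem.Chars.find (PySem.Chars.join ['\n'] (p2 :: ps2)) q).toNat =
            p.length + ((PySem.Chars.find (PySem.Chars.join ['\n'] (p2 :: ps2)) q).toNat + 1) := by
          omega
        rw [h4]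
        rw [List.take_append]
        rw [List.take_of_length_le (by omega)]
        have h5 : p.length + ((PySem.Chars.find (PySem.Chars.join ['\n'] (p2 :: ps2)) q).toNat + 1)
            - p.length = (PySem.Chars.find (PySem.Chars.join ['\n'] (p2 :: ps2)) q).toNat + 1 := by
          omega
        rw [h5, List.take_succ_cons]
      · have hintF : PySem.Chars.isIn q (PySem.Chars.join ['\n'] (p2 :: ps2)) = false := by
          simpa using hint
        have hfr : PySem.Chars.find (p ++ '\n' :: PySem.Chars.join ['\n'] (p2 :: ps2)) q = -1 := by
          apply (PySem.Chars.find_eq_neg_one_iff _ q).mpr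
          intro hc
          rcases (pvInfix_split hqnl).mp hc with h | h
          · rw [(PySem.Chars.isIn_iff_infix q p).mpr h] at hinF
            exact absurd hinF (by simp)
          · rw [(PySem.Chars.isIn_iff_infix q _).mpr h] at hintF
            exact absurd hintF (by simp)
        rw [if_pos hfr]
        have hft : PySem.Chars.find (PySem.Chars.join ['\n'] (p2 :: ps2)) q = -1 := by
          apply (PySem.Chars.find_eq_neg_one_iff _ q).mpr
          intro hc
          rw [(PySem.Chars.isIn_iff_infix q _).mpr hc] at hintF
          exact absurd hintF (by simp)
        rw [if_pos hft] at iht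
        rw [← iht]

theorem pvBC (q : String) (hqnl : '\n' ∉ q.toList) (parts : List String) (hne : parts ≠ [])
    (hbf : ∀ l ∈ parts, pvBF l.toList) :
    (if PySem.Str.find (PySem.Str.join "\n" parts) q ≠ -1 then
        PySem.Str.slice (PySem.Str.join "\n" parts) none
          (some (PySem.Str.find (PySem.Str.join "\n" parts) q))
      else PySem.Str.join "\n" parts) =
      PySem.Str.join "\n" (pvCutS q parts) := by
  rcases parts with _ | ⟨p, ps⟩
  · exact absurd rfl hne
  · have hC := pvContentC q.toList hqnl (ps.map String.toList) p.toList (hbf p (by simp))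
      (by intro l hl; simp at hl; obtain ⟨x, hx, hxl⟩ := hl; exact hxl ▸ hbf x (by simp [hx]))
    have hnlst : ("\n" : String).toList = ['\n'] := rfl
    have hfind : PySem.Str.find (PySem.Str.join "\n" (p :: ps)) q =
        PySem.Chars.find (PySem.Chars.join ['\n'] (p.toList :: ps.map String.toList)) q.toList := by
      rw [PySem.Str.find_eq, pvJoin_toList, hnlst, List.map_cons]
    apply pvStrInj
    by_cases hf : PySem.Str.find (PySem.Str.join "\n" (p :: ps)) q ≠ -1
    · rw [if_pos hf]
      have hfC : PySem.Chars.find (PySem.Chars.join ['\n'] (p.toList :: ps.map String.toList)) q.toList ≠ -1 := by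
        rw [← hfind]; exact hf
      have hnn : 0 ≤ PySem.Chars.find (PySem.Chars.join ['\n'] (p.toList :: ps.map String.toList)) q.toList := by
        have := PySem.Chars.neg_one_le_find (PySem.Chars.join ['\n'] (p.toList :: ps.map String.toList)) q.toList
        omega
      rw [PySem.Str.toList_slice, PySem.Chars.slice_eq_listSlice, hfind,
        PySem.List.slice_to _ hnn]
      rw [pvJoin_toList, hnlst, List.map_cons]
      rw [pvJoin_toList, hnlst, pvCutS_map, List.map_cons]
      rw [if_neg hfC] at hC
      exact hC
    · rw [if_neg hf]
      have hfC : PySem.Chars.find (PySem.Chars.join ['\n'] (p.toList :: ps.map String.toList)) q.toList = -1 := by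
        rw [← hfind]; simpa using hf
      rw [pvJoin_toList, hnlst, List.map_cons]
      rw [pvJoin_toList, hnlst, pvCutS_map, List.map_cons]
      rw [if_pos hfC] at hC
      exact hC

-- ---- the open-branch equivalence ----

theorem pvOpen_eq (q s : String) (tail : List String)
    (hqne : q.toList ≠ []) (hqnl : '\n' ∉ q.toList)
    (hs : pvBF s.toList) (htail : ∀ l ∈ tail, pvBF l.toList) :
    pvOpenA q s tail =
      (if PySem.Str.find (PySem.Str.join "\n" (PySem.Str.slice s (some 3) none :: tail)) q ≠ -1 then
        pvCleanB (PySem.Str.slice (PySem.Str.join "\n" (PySem.Str.slice s (some 3) none :: tail)) none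
          (some (PySem.Str.find (PySem.Str.join "\n" (PySem.Str.slice s (some 3) none :: tail)) q)))
       else pvCleanB (PySem.Str.join "\n" (PySem.Str.slice s (some 3) none :: tail))) := by
  have hbodybf : pvBF (PySem.Str.slice s (some 3) none).toList := by
    apply pvBF_of_subset hs
    intro c hc
    rw [PySem.Str.toList_slice, PySem.Chars.slice_eq_listSlice,
      PySem.List.slice_from _ (by norm_num)] at hc
    exact List.drop_subset _ _ hc
  have hparts : ∀ l ∈ PySem.Str.slice s (some 3) none :: tail, pvBF l.toList := by
    intro l hl
    rcases List.mem_cons.mp hl with hl | hl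
    · exact hl ▸ hbodybf
    · exact htail l hl
  have hA : pvOpenA q s tail = pvCleanA (pvCutS q (PySem.Str.slice s (some 3) none :: tail)) := by
    show (if PySem.Str.isIn q (PySem.Str.slice s (some 3) none) then
            PySem.Str.strip (pvSplitHead (PySem.Str.slice s (some 3) none) q)
          else pvScanA q tail [PySem.Str.slice s (some 3) none]) = _
    by_cases hin : PySem.Str.isIn q (PySem.Str.slice s (some 3) none) = true
    · rw [if_pos hin, pvSplitHead_eq _ q hqne hin]
      show _ = pvCleanA (pvCutS q (_ :: tail))
      simp only [pvCutS]
      rw [if_pos hin, pvCleanA_single]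
    · rw [if_neg hin, pvScan_eq q hqne tail _]
      simp only [pvCutS]
      rw [if_neg hin]
      rfl
  have hB2 := pvBC q hqnl (PySem.Str.slice s (some 3) none :: tail) (by simp) hparts
  have hsplit : (if PySem.Str.find (PySem.Str.join "\n" (PySem.Str.slice s (some 3) none :: tail)) q ≠ -1 then
        pvCleanB (PySem.Str.slice (PySem.Str.join "\n" (PySem.Str.slice s (some 3) none :: tail)) none
          (some (PySem.Str.find (PySem.Str.join "\n" (PySem.Str.slice s (some 3) none :: tail)) q)))
       else pvCleanB (PySem.Str.join "\n" (PySem.Str.slice s (some 3) none :: tail))) =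
      pvCleanB (if PySem.Str.find (PySem.Str.join "\n" (PySem.Str.slice s (some 3) none :: tail)) q ≠ -1 then
        PySem.Str.slice (PySem.Str.join "\n" (PySem.Str.slice s (some 3) none :: tail)) none
          (some (PySem.Str.find (PySem.Str.join "\n" (PySem.Str.slice s (some 3) none :: tail)) q))
       else PySem.Str.join "\n" (PySem.Str.slice s (some 3) none :: tail)) := by
    split
    · rfl
    · rfl
  rw [hA, hsplit, hB2, pvCleanB_eq]
  have hcutne : pvCutS q (PySem.Str.slice s (some 3) none :: tail) ≠ [] := by
    simp only [pvCutS]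
    split <;> simp
  have hcutbf : ∀ l ∈ pvCutS q (PySem.Str.slice s (some 3) none :: tail), pvBF l.toList := by
    intro l hl
    have hmem : l.toList ∈ (pvCutS q (PySem.Str.slice s (some 3) none :: tail)).map String.toList :=
      List.mem_map_of_mem hl
    rw [pvCutS_map] at hmem
    refine pvCutC_bf q.toList _ ?_ _ hmem
    intro x hx
    rw [List.mem_map] at hx
    obtain ⟨y, hy, hxy⟩ := hx
    exact hxy ▸ hparts y hy
  rw [pvSLJS _ hcutne hcutbf, pvCleanA_dtes]

-- ---- dispatch and skip ----

theorem pvTake3_eq_of_startswith (s p : String) (h3 : p.toList.length = 3)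
    (h : PySem.Str.startswith s p = true) :
    PySem.Str.slice s none (some 3) = p := by
  apply pvStrInj
  rw [PySem.Str.toList_slice, PySem.Chars.slice_eq_listSlice, PySem.List.slice_to _ (by norm_num)]
  have hp : p.toList <+: s.toList := by
    rw [PySem.Str.startswith_eq] at h
    exact (PySem.Chars.startswith_iff _ _).mp h
  have h4 := List.prefix_iff_eq_take.mp hp
  rw [h3] at h4
  exact h4.symm

theorem pvStartswith_of_take3 (s p : String) (h3 : p.toList.length = 3)
    (h : PySem.Str.slice s none (some 3) = p) : PySem.Str.startswith s p = true := by
  rw [PySem.Str.startswith_eq]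
  apply (PySem.Chars.startswith_iff _ _).mpr
  apply List.prefix_iff_eq_take.mpr
  rw [h3]
  have h4 := congrArg String.toList h
  rw [PySem.Str.toList_slice, PySem.Chars.slice_eq_listSlice,
    PySem.List.slice_to _ (by norm_num)] at h4
  exact h4.symm

theorem pvMain_eq (ls : List String) (hbf : ∀ l ∈ ls, pvBF l.toList) :
    pvMainA ls =
      (match pvDropBlank ls with
      | [] => ""
      | l :: tail =>
        let s := PySem.Str.lstrip l
        let q := PySem.Str.slice s none (some 3)
        if q = "\"\"\"" ∨ q = "'''" then
          let rest := PySem.Str.join "\n" (PySem.Str.slice s (some 3) none :: tail)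
          let idx := PySem.Str.find rest q
          if idx ≠ -1 then pvCleanB (PySem.Str.slice rest none (some idx)) else pvCleanB rest
        else "") := by
  induction ls with
  | nil => rfl
  | cons l ls ih =>
    by_cases hblank : PySem.Str.strip l = ""
    · simp only [pvMainA, pvDropBlank, if_pos hblank]
      exact ih (fun x hx => hbf x (by simp [hx]))
    · simp only [pvMainA, pvDropBlank, if_neg hblank]
      have hsbf : pvBF (PySem.Str.lstrip l).toList := by
        apply pvBF_of_subset (hbf l (by simp))
        intro c hc
        rw [PySem.Str.toList_lstrip] at hc
        exact (List.dropWhile_sublist _).subset hc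
      have htbf : ∀ x ∈ ls, pvBF x.toList := fun x hx => hbf x (by simp [hx])
      by_cases h1 : PySem.Str.startswith (PySem.Str.lstrip l) "\"\"\"" = true
      · have hq : PySem.Str.slice (PySem.Str.lstrip l) none (some 3) = "\"\"\"" :=
          pvTake3_eq_of_startswith _ _ (by decide) h1
        rw [if_pos h1]
        simp only [hq]
        rw [if_pos (Or.inl trivial)]
        exact pvOpen_eq _ _ ls (by decide) (by decide) hsbf htbf
      · rw [if_neg h1]
        by_cases h2 : PySem.Str.startswith (PySem.Str.lstrip l) "'''" = true
        · have hq : PySem.Str.slice (PySem.Str.lstrip l) none (some 3) = "'''" :=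
            pvTake3_eq_of_startswith _ _ (by decide) h2
          rw [if_pos h2]
          simp only [hq]
          rw [if_pos (Or.inr trivial)]
          exact pvOpen_eq _ _ ls (by decide) (by decide) hsbf htbf
        · rw [if_neg h2]
          have hnq : ¬ (PySem.Str.slice (PySem.Str.lstrip l) none (some 3) = "\"\"\"" ∨
              PySem.Str.slice (PySem.Str.lstrip l) none (some 3) = "'''") := by
            rintro (hc | hc)
            · exact h1 (pvStartswith_of_take3 _ _ (by decide) hc)
            · exact h2 (pvStartswith_of_take3 _ _ (by decide) hc)
          rw [if_neg hnq]

-- ===== VERDICT (by name: the statement is the Claim_ definition above) =====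
theorem extract_docstring_py_spec : Claim_equal_extract_docstring_py := by
  intro src _
  unfold Spec_extract_docstring_py extract_docstring_py extract_docstring_py_alt
  exact pvMain_eq (PySem.Str.splitlines src) (pvLines_bf src)
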